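-- pv_equiv track=rewrite | github.com/johanlahti/urban-lu-model | script/Config_old.py | getLandUseTypes
-- ===== SOURCE A (Python) =====
-- def getLandUseTypes(landUses):
--     """ Store the LU nrs in arrays, filtered by land use type. """
--     luNrsOutsideRegion = []
--     luNrsVac = []
--     luNrsDyn = []
--     luNrsStat = []
--     for nr in landUses.keys():
--         luType = landUses[nr]["type"]
--         if luType=="none":
--             luNrsOutsideRegion.append(nr)
--         elif luType=="vacant":
--             luNrsVac.append(nr)
--         elif luType=="dynamic":
--             luNrsDyn.append(nr)
--         elif luType=="static":
--             luNrsStat.append(nr)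
--     return luNrsOutsideRegion, luNrsVac, luNrsDyn, luNrsStat
-- ===== SOURCE B (Python) =====
-- def getLandUseTypes(landUses):
--     """ Store the LU nrs in arrays, filtered by land use type. """
--     def nrsOfType(t):
--         return [nr for nr, lu in landUses.items() if lu["type"] == t]
--     return nrsOfType("none"), nrsOfType("vacant"), nrsOfType("dynamic"), nrsOfType("static")
-- ===== Notes on version B (the rewrite author's own statement) =====
-- stated objective: simpler
-- what changed: Replaces A's single pass with four mutated accumulator lists by four independent staged filter passes (one list comprehension per land-use type), correct because the four categories are disjoint predicates on each entry.
-- outside the precondition, e.g. on getLandUseTypes({1: {}}): A raises KeyError, B raises KeyError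
import Mathlib
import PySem

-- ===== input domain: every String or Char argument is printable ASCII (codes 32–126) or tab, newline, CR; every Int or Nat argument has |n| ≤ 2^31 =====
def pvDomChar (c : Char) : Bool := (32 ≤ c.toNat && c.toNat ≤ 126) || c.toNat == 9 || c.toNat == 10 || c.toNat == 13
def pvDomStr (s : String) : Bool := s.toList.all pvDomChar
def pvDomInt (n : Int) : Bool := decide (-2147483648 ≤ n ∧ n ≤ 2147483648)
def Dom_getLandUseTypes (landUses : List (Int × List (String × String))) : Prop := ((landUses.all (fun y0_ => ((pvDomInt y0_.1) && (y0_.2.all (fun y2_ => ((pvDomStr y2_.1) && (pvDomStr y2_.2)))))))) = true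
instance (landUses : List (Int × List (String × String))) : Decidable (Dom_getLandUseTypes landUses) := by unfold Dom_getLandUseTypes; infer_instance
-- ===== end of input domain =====

-- B replaces A's one-pass four-accumulator partition by four independent filter passes
-- (one list comprehension per type): simpler, same O(n) cost (4 scans).


-- ===== PORT A =====
-- landUses[nr]["type"]: the KeyError case ("type" absent) is excluded by Pre_, so .getD "" is never taken there
def getLandUseTypes (landUses : List (Int × List (String × String))) : List Int × List Int × List Int × List Int :=
  landUses.foldl (fun (st : List Int × List Int × List Int × List Int) p =>
    let (o, v, d, s) := st
    let luType := (PySem.Dict.get? (PySem.Dict.mk p.2) "type").getD ""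
    if luType = "none" then (o ++ [p.1], v, d, s)
    else if luType = "vacant" then (o, v ++ [p.1], d, s)
    else if luType = "dynamic" then (o, v, d ++ [p.1], s)
    else if luType = "static" then (o, v, d, s ++ [p.1])
    else (o, v, d, s)) ([], [], [], [])

-- ===== PORT B =====
-- nrsOfType(t) = [nr for nr, lu in landUses.items() if lu["type"] == t]  (one filter pass per type)
def nrsOfType (landUses : List (Int × List (String × String))) (t : String) : List Int :=
  landUses.filterMap (fun p =>
    if (PySem.Dict.get? (PySem.Dict.mk p.2) "type").getD "" = t then some p.1 else none)

def getLandUseTypes_alt (landUses : List (Int × List (String × String))) : List Int × List Int × List Int × List Int :=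
  (nrsOfType landUses "none", nrsOfType landUses "vacant",
   nrsOfType landUses "dynamic", nrsOfType landUses "static")

-- ===== PRECONDITION & SPEC =====
-- Pre_ excludes (a) inputs whose outer or inner association lists carry duplicate keys — those do not
-- represent a Python dict uniquely — and (b) entries whose value dict lacks the "type" key, on which A raises KeyError.
def Pre_getLandUseTypes (landUses : List (Int × List (String × String))) : Prop :=
  (landUses.map Prod.fst).Nodup ∧
  ∀ p ∈ landUses, (p.2.map Prod.fst).Nodup ∧ (PySem.Dict.get? (PySem.Dict.mk p.2) "type").isSome
instance (landUses : List (Int × List (String × String))) : Decidable (Pre_getLandUseTypes landUses) := by unfold Pre_getLandUseTypes; infer_instance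
def pvWitness_getLandUseTypes : (List (Int × List (String × String))) :=
  [(1, [("type", "vacant")]), (2, [("type", "none")]), (3, [("type", "static")])]

def Spec_getLandUseTypes (landUses : List (Int × List (String × String))) (out : List Int × List Int × List Int × List Int) : Prop := out = getLandUseTypes_alt landUses
instance (landUses : List (Int × List (String × String))) (out : List Int × List Int × List Int × List Int) : Decidable (Spec_getLandUseTypes landUses out) := by unfold Spec_getLandUseTypes; infer_instance

-- ===== CLAIM (what is proved, stated in full; the proofs are below) =====
def Claim_equal_getLandUseTypes : Prop := ∀ (landUses : List (Int × List (String × String))), Dom_getLandUseTypes landUses → Pre_getLandUseTypes landUses → Spec_getLandUseTypes landUses (getLandUseTypes landUses)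

-- ===== LEMMAS AND PROOFS =====

/-- the "type" of one entry, as both ports compute it -/
def pvTyp (p : Int × List (String × String)) : String :=
  (PySem.Dict.get? (PySem.Dict.mk p.2) "type").getD ""

theorem nrsOfType_cons (t : String) (p : Int × List (String × String)) (ls : List (Int × List (String × String))) :
    nrsOfType (p :: ls) t = (if pvTyp p = t then [p.1] else []) ++ nrsOfType ls t := by
  simp [nrsOfType, pvTyp, List.filterMap_cons]; split_ifs <;> simp

theorem foldA_spec (ls : List (Int × List (String × String)))
    (o v d s : List Int) :
    ls.foldl (fun (st : List Int × List Int × List Int × List Int) p =>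
      let (o, v, d, s) := st
      let luType := (PySem.Dict.get? (PySem.Dict.mk p.2) "type").getD ""
      if luType = "none" then (o ++ [p.1], v, d, s)
      else if luType = "vacant" then (o, v ++ [p.1], d, s)
      else if luType = "dynamic" then (o, v, d ++ [p.1], s)
      else if luType = "static" then (o, v, d, s ++ [p.1])
      else (o, v, d, s)) (o, v, d, s)
    = (o ++ nrsOfType ls "none", v ++ nrsOfType ls "vacant",
       d ++ nrsOfType ls "dynamic", s ++ nrsOfType ls "static") := by
  induction ls generalizing o v d s with
  | nil => simp [nrsOfType]
  | cons p ls ih =>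
    simp only [List.foldl_cons]
    by_cases h0 : pvTyp p = "none" <;> by_cases h1 : pvTyp p = "vacant" <;>
      by_cases h2 : pvTyp p = "dynamic" <;> by_cases h3 : pvTyp p = "static" <;>
      simp_all [pvTyp, nrsOfType_cons, List.append_assoc]

-- ===== VERDICT (by name: the statement is the Claim_ definition above) =====
theorem getLandUseTypes_spec : Claim_equal_getLandUseTypes := by
  intro ls _ _
  unfold Spec_getLandUseTypes getLandUseTypes getLandUseTypes_alt
  simpa using foldA_spec ls [] [] [] []
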